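-- pv_equiv track=rewrite | github.com/dave322942780/AlgoLand | maximum_area_covered.py | solution
-- ===== SOURCE A (Python) =====
-- def solution(matrix):
--     height, width = len(matrix), len(matrix[0])
--     visited = [[0] * width for _ in range(height)]
--     max_area = 0
--
--     def count_area(x, y):
--         if y < 0 or y >= height or x < 0 or x >= width or visited[y][x]:
--             return 0
--
--         visited[y][x] = 1
--         if not matrix[y][x]:
--             return 0
--         else:
--             return 1 + count_area(x - 1, y) + count_area(x + 1, y) + count_area(x, y - 1) + count_area(x, y + 1)
--
--     for y in range(height):
--         for x in range(width):
--             max_area = max(count_area(x, y), max_area)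
--
--     return max_area
-- ===== SOURCE B (Python) =====
-- def solution(matrix):
--     height, width = len(matrix), len(matrix[0])
--     visited = set()
--     best = 0
--     for y in range(height):
--         for x in range(width):
--             area = 0
--             stack = [(x, y)]
--             while stack:
--                 cx, cy = stack.pop()
--                 if cy < 0 or cy >= height or cx < 0 or cx >= width or (cx, cy) in visited:
--                     continue
--                 visited.add((cx, cy))
--                 if not matrix[cy][cx]:
--                     continue
--                 area += 1
--                 stack.extend([(cx, cy + 1), (cx, cy - 1), (cx + 1, cy), (cx - 1, cy)])
--             best = max(area, best)
--     return best
-- ===== Notes on version B (the rewrite author's own statement) =====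
-- stated objective: alternative
-- what changed: The recursive flood fill (nested count_area recursion mutating a visited matrix) is replaced by an iterative explicit-stack flood fill over a visited set, so no Python recursion is used and deep components cannot hit the recursion limit.
import Mathlib
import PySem

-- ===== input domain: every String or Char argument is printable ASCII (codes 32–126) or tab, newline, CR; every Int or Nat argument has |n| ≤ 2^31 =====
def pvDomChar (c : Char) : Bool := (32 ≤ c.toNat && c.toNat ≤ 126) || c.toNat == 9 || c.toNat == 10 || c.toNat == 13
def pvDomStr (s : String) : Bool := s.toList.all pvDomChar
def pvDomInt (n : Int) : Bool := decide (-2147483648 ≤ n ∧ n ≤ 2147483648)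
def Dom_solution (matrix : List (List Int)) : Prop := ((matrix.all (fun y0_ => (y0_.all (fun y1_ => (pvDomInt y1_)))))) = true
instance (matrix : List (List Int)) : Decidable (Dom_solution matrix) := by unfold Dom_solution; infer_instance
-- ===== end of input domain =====

-- B replaces A's recursive flood fill by an explicit stack-based flood fill (iterative, no recursion);
-- return-value equivalence only is claimed (A also builds a `visited` matrix internally, never observable).

-- ===== PORT A =====
-- matrix[y][x], total form; exact whenever the guards have already established
-- 0 ≤ y < len(matrix) and 0 ≤ x < width ≤ len(matrix[y]) (the latter from Pre_solution).
def pvCell (matrix : List (List Int)) (x y : Int) : Int :=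
  (PySem.List.pyGet? ((PySem.List.pyGet? matrix y).getD []) x).getD 0

-- Python's `visited` (a height×width 0/1 matrix, entries only ever set to 1) is ported as the
-- list of coordinates (x, y) set so far: the test `visited[y][x]` is membership, setting is
-- appending.  The recursion carries fuel: every recursive level first marks a fresh cell, so a
-- call started with fuel height*width+1 (as `solution` does) can never reach the 0 branch.
def pvDfsA (matrix : List (List Int)) (height width : Int) :
    Nat → Int → Int → List (Int × Int) → Int × List (Int × Int)
  | 0, _, _, v => (0, v)
  | f+1, x, y, v =>
    if y < 0 ∨ height ≤ y ∨ x < 0 ∨ width ≤ x ∨ (x, y) ∈ v then (0, v)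
    else if pvCell matrix x y = 0 then (0, v ++ [(x, y)])
    else
      let r1 := pvDfsA matrix height width f (x-1) y (v ++ [(x, y)])
      let r2 := pvDfsA matrix height width f (x+1) y r1.2
      let r3 := pvDfsA matrix height width f x (y-1) r2.2
      let r4 := pvDfsA matrix height width f x (y+1) r3.2
      (1 + r1.1 + r2.1 + r3.1 + r4.1, r4.2)

def solution (matrix : List (List Int)) : Int :=
  let height : Int := matrix.length
  let width : Int := ((PySem.List.pyGet? matrix 0).getD []).length
  let fuel : Nat := matrix.length * ((PySem.List.pyGet? matrix 0).getD []).length + 1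
  ((PySem.List.pyRange 0 height 1).foldl (fun st y =>
      (PySem.List.pyRange 0 width 1).foldl (fun st x =>
        let r := pvDfsA matrix height width fuel x y st.2
        (max r.1 st.1, r.2)) st) ((0 : Int), ([] : List (Int × Int)))).1

-- ===== PORT B =====
-- Source B's `while stack:` loop; the List's head is the top of the stack, so Python's
-- stack.extend([(cx,cy+1),(cx,cy-1),(cx+1,cy),(cx-1,cy)]) followed by pop() is consing
-- (cx-1,cy), (cx+1,cy), (cx,cy-1), (cx,cy+1) in that pop order.  Each entry carries a fuel
-- tag purely as a totality device: a popped entry with tag f+1 pushes its neighbours with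
-- tag f; since every processed entry marks a fresh cell first, the initial tag
-- height*width+1 used by `solution_alt` is never exhausted on any run.
def pvFlood (matrix : List (List Int)) (height width : Int) :
    List (Int × Int × Nat) → PySem.Set (Int × Int) → Int → Int × PySem.Set (Int × Int)
  | [], v, area => (area, v)
  | (_, _, 0) :: rest, v, area => pvFlood matrix height width rest v area
  | (cx, cy, f+1) :: rest, v, area =>
    if cy < 0 ∨ height ≤ cy ∨ cx < 0 ∨ width ≤ cx ∨ (cx, cy) ∈ v then
      pvFlood matrix height width rest v area
    else if pvCell matrix cx cy = 0 then
      pvFlood matrix height width rest (PySem.Set.add v (cx, cy)) area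
    else
      pvFlood matrix height width
        ((cx-1, cy, f) :: (cx+1, cy, f) :: (cx, cy-1, f) :: (cx, cy+1, f) :: rest)
        (PySem.Set.add v (cx, cy)) (area + 1)
  termination_by stack _ _ => (stack.map (fun e => 5 ^ e.2.2)).sum
  decreasing_by
  all_goals simp
  all_goals (have h5 : 0 < 5 ^ f := by positivity;
             have _h6 : (5:Nat) ^ (f + 1) = 5 * 5 ^ f := pow_succ' 5 f; omega)

def solution_alt (matrix : List (List Int)) : Int :=
  let height : Int := matrix.length
  let width : Int := ((PySem.List.pyGet? matrix 0).getD []).length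
  let fuel : Nat := matrix.length * ((PySem.List.pyGet? matrix 0).getD []).length + 1
  ((PySem.List.pyRange 0 height 1).foldl (fun st y =>
      (PySem.List.pyRange 0 width 1).foldl (fun st x =>
        let r := pvFlood matrix height width [(x, y, fuel)] st.2 0
        (max r.1 st.1, r.2)) st) ((0 : Int), (PySem.Set.empty : PySem.Set (Int × Int)))).1

-- ===== PRECONDITION & SPEC =====
-- Pre_ excludes exactly the inputs on which Python A raises IndexError: the empty matrix
-- (matrix[0]) and matrices with a row shorter than the first row (matrix[y][x] out of range).
def Pre_solution (matrix : List (List Int)) : Prop :=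
  matrix ≠ [] ∧ ∀ row ∈ matrix, (matrix.headD []).length ≤ row.length
instance (matrix : List (List Int)) : Decidable (Pre_solution matrix) := by
  unfold Pre_solution; infer_instance

def pvWitness_solution : List (List Int) := [[1, 0], [1, 1]]

def Spec_solution (matrix : List (List Int)) (out : Int) : Prop := out = solution_alt matrix
instance (matrix : List (List Int)) (out : Int) : Decidable (Spec_solution matrix out) := by
  unfold Spec_solution; infer_instance

-- ===== CLAIM (what is proved, stated in full; the proofs are below) =====
def Claim_equal_solution : Prop := ∀ (matrix : List (List Int)), Dom_solution matrix → Pre_solution matrix → Spec_solution matrix (solution matrix)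

-- ===== LEMMAS AND PROOFS =====

-- Set.add on an element known absent is appending (A's representation of marking).
theorem pvSet_add_of_not_mem {α : Type} [BEq α] [LawfulBEq α] (s : PySem.Set α) (x : α)
    (h : x ∉ s) : PySem.Set.add s x = s ++ [x] := by
  simp [PySem.Set.add, PySem.Set.contains, h]

-- Bisimulation: processing the stack entry (x, y, f) is exactly one (fuel-f) recursive
-- flood-fill call of A — same visited list, the call's count added to the accumulator.
theorem pvFlood_dfs (matrix : List (List Int)) (height width : Int) :
    ∀ (f : Nat) (x y : Int) (v : List (Int × Int)) (rest : List (Int × Int × Nat)) (area : Int),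
      pvFlood matrix height width ((x, y, f) :: rest) v area
        = pvFlood matrix height width rest (pvDfsA matrix height width f x y v).2
            (area + (pvDfsA matrix height width f x y v).1) := by
  intro f
  induction f with
  | zero => intro x y v rest area; simp [pvFlood, pvDfsA]
  | succ f ih =>
    intro x y v rest area
    by_cases hg : y < 0 ∨ height ≤ y ∨ x < 0 ∨ width ≤ x ∨ (x, y) ∈ v
    · simp [pvFlood, pvDfsA, hg]
    · have hnm : (x, y) ∉ v := by
        intro hmem; exact hg (Or.inr (Or.inr (Or.inr (Or.inr hmem))))
      by_cases hc : pvCell matrix x y = 0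
      · simp [pvFlood, pvDfsA, hg, hc, pvSet_add_of_not_mem _ _ hnm]
      · rw [show pvFlood matrix height width ((x, y, f+1) :: rest) v area
              = pvFlood matrix height width
                  ((x-1, y, f) :: (x+1, y, f) :: (x, y-1, f) :: (x, y+1, f) :: rest)
                  (PySem.Set.add v (x, y)) (area + 1) by
            simp [pvFlood, hg, hc]]
        rw [pvSet_add_of_not_mem _ _ hnm]
        rw [ih, ih, ih, ih]
        have hd : pvDfsA matrix height width (f+1) x y v
            = (let r1 := pvDfsA matrix height width f (x-1) y (v ++ [(x, y)])
               let r2 := pvDfsA matrix height width f (x+1) y r1.2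
               let r3 := pvDfsA matrix height width f x (y-1) r2.2
               let r4 := pvDfsA matrix height width f x (y+1) r3.2
               (1 + r1.1 + r2.1 + r3.1 + r4.1, r4.2)) := by
          simp [pvDfsA, hg, hc]
        rw [hd]
        simp only []
        congr 1
        ring

-- foldl with pointwise-equal step functions.
theorem pvFoldl_ext {α β : Type} (f g : β → α → β) (h : ∀ b a, f b a = g b a) :
    ∀ (l : List α) (b : β), l.foldl f b = l.foldl g b := by
  intro l
  induction l with
  | nil => intro b; rfl
  | cons a l ih => intro b; simp [List.foldl, h, ih]

-- ===== VERDICT (by name: the statement is the Claim_ definition above) =====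
theorem solution_spec : Claim_equal_solution := by
  intro matrix _ _
  unfold Spec_solution solution solution_alt
  refine congrArg Prod.fst ?_
  apply pvFoldl_ext
  intro st y
  apply pvFoldl_ext
  intro st x
  rw [pvFlood_dfs]
  simp [pvFlood]
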